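-- pv_equiv track=rewrite | github.com/lancelote/advent_of_code | src/year2018/day05a.py | solve
-- ===== SOURCE A (Python) =====
-- def react(char1: str, char2: str) -> bool:
--     """Check if pair reacts."""
--     return char1 != char2 and char1.lower() == char2.lower()
--
-- def solve(task: str) -> int:
--     """Reduce polymer and count left unites."""
--     left: list[str] = []
--     for char in task.strip():
--         if not left:
--             left.append(char)
--         else:
--             if react(left[-1], char):
--                 left.pop()
--             else:
--                 left.append(char)
--     return len(left)
-- ===== SOURCE B (Python) =====
-- def react(char1: str, char2: str) -> bool:
--     """Check if pair reacts."""
--     return char1 != char2 and char1.lower() == char2.lower()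
--
-- def solve(task: str) -> int:
--     """Reduce polymer and count left unites."""
--     s = task.strip()
--     while True:
--         for i in range(len(s) - 1):
--             if react(s[i], s[i + 1]):
--                 s = s[:i] + s[i + 2:]
--                 break
--         else:
--             return len(s)
-- ===== Notes on version B (the rewrite author's own statement) =====
-- stated objective: alternative
-- what changed: Replaces A's single-pass stack reduction by the naive fixed-point iteration: repeatedly scan for the first reacting adjacent pair, delete it, and restart until a full scan finds none; the result agrees because the pair-removal rewriting is confluent (proved via a cancellation lemma on the reduced normal form).
import Mathlib
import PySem

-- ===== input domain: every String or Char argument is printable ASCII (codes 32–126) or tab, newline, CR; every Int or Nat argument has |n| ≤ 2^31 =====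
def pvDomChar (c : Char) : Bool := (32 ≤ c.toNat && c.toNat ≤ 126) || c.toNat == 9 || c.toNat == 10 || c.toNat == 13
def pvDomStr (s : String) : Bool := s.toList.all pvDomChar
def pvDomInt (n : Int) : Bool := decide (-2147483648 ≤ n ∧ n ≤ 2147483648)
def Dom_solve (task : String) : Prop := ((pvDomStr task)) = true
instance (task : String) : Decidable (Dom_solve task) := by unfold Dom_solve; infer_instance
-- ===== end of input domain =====

-- B replaces A's one-pass stack reduction by the naive repeated scan (remove the first
-- reacting adjacent pair, restart until none); same result because the reduction is confluent.

-- ===== PORT A =====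
-- shared helper: Python's react(char1, char2) (used verbatim by both Source A and Source B)
def react (a b : Char) : Bool := a != b && (PySem.Chars.lowerChar a == PySem.Chars.lowerChar b)

-- A's loop: 'for char in task.strip(): …' with the stack 'left' (append/pop at the end)
def solveLoop (left : List Char) : List Char → List Char
  | [] => left
  | c :: rest =>
    if left = [] then solveLoop (left ++ [c]) rest
    else
      if react (PySem.List.pyGetD left (-1) c) c then  -- left[-1]; in this branch left ≠ [], so the default is never used
        solveLoop left.dropLast rest                    -- left.pop()
      else
        solveLoop (left ++ [c]) rest                    -- left.append(char)

def solve (task : String) : Int :=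
  ((solveLoop [] (PySem.Str.strip task).toList).length : Int)

-- ===== PORT B =====
-- Source B's inner 'for i in range(len(s)-1)': find the first i with react(s[i], s[i+1]) and
-- return s[:i] + s[i+2:]; none = the for-loop fell through (for-else)
def reduceOnce : List Char → Option (List Char)
  | [] => none
  | [_] => none
  | a :: b :: rest =>
    if react a b then some rest
    else (reduceOnce (b :: rest)).map (a :: ·)

-- each successful scan removes exactly two characters (termination of the while-loop)
theorem reduceOnce_length : ∀ {s t : List Char}, reduceOnce s = some t → t.length + 2 = s.length
  | [], _, h => by simp [reduceOnce] at h
  | [_], _, h => by simp [reduceOnce] at h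
  | a :: b :: rest, t, h => by
    by_cases hr : react a b = true
    · simp [reduceOnce, hr] at h
      simp [← h]
    · simp [reduceOnce, hr] at h
      obtain ⟨t', ht', rfl⟩ := h
      have := reduceOnce_length ht'
      simp at this ⊢
      omega

-- Source B's 'while True' loop
def reduceLoop (s : List Char) : List Char :=
  match _h : reduceOnce s with
  | none => s
  | some t => reduceLoop t
termination_by s.length
decreasing_by
  have := reduceOnce_length _h
  omega

def solve_alt (task : String) : Int :=
  ((reduceLoop (PySem.Str.strip task).toList).length : Int)

-- ===== PRECONDITION & SPEC =====
def Spec_solve (task : String) (out : Int) : Prop := out = solve_alt task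
instance (task : String) (out : Int) : Decidable (Spec_solve task out) := by unfold Spec_solve; infer_instance

-- ===== CLAIM (what is proved, stated in full; the proofs are below) =====
def Claim_equal_solve : Prop := ∀ (task : String), Dom_solve task → Spec_solve task (solve task)

-- ===== LEMMAS AND PROOFS =====

-- The common normal form: pushing one character onto an already-reduced list
def push (c : Char) (r : List Char) : List Char :=
  match r with
  | [] => [c]
  | h :: t => if react c h then t else c :: h :: t

-- right-fold normal form of a polymer
def nf (s : List Char) : List Char := s.foldr push []

-- no two adjacent characters react
def Reduced (s : List Char) : Prop := List.IsChain (fun a b => react a b = false) s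

theorem char_eq_iff_toNat (a c : Char) : a = c ↔ a.toNat = c.toNat := by
  constructor
  · intro h; rw [h]
  · intro h; exact Char.ext (UInt32.toNat_inj.mp h)

theorem lower_toNat (a : Char) :
    (PySem.Chars.lowerChar a).toNat = if 65 ≤ a.toNat ∧ a.toNat ≤ 90 then a.toNat + 32 else a.toNat := by
  simp only [PySem.Chars.lowerChar, PySem.Chars.isupper]
  by_cases hc : 65 ≤ a.toNat ∧ a.toNat ≤ 90
  · have h1 : 'A' ≤ a := by
      show ('A').toNat ≤ a.toNat
      exact hc.1
    have h2 : a ≤ 'Z' := by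
      show a.toNat ≤ ('Z').toNat
      exact hc.2
    have hv : (a.toNat + 32).isValidChar := Or.inl (by omega)
    simp [h1, h2, hc, Char.toNat_ofNat, hv]
  · have h1 : ¬ ('A' ≤ a ∧ a ≤ 'Z') := by
      intro h
      exact hc ⟨h.1, h.2⟩
    simp [hc, h1]

-- two characters that both react with b are the same character
theorem react_unique {a b h : Char} (h1 : react a b = true) (h2 : react h b = true) : a = h := by
  simp only [react, Bool.and_eq_true, bne_iff_ne, ne_eq, beq_iff_eq] at h1 h2
  have e1 : (PySem.Chars.lowerChar a).toNat = (PySem.Chars.lowerChar b).toNat := by rw [h1.2]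
  have e2 : (PySem.Chars.lowerChar h).toNat = (PySem.Chars.lowerChar b).toNat := by rw [h2.2]
  have n1 : a.toNat ≠ b.toNat := fun hc => h1.1 ((char_eq_iff_toNat a b).mpr hc)
  have n2 : h.toNat ≠ b.toNat := fun hc => h2.1 ((char_eq_iff_toNat h b).mpr hc)
  rw [lower_toNat, lower_toNat] at e1
  rw [lower_toNat, lower_toNat] at e2
  rw [char_eq_iff_toNat]
  split_ifs at e1 e2 <;> omega

theorem react_comm (a b : Char) : react a b = react b a := by
  rw [Bool.eq_iff_iff]
  simp only [react, Bool.and_eq_true, bne_iff_ne, ne_eq, beq_iff_eq]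
  constructor <;> rintro ⟨x, y⟩ <;> exact ⟨fun h => x h.symm, y.symm⟩

theorem push_reduced {r : List Char} (c : Char) (h : Reduced r) : Reduced (push c r) := by
  cases r with
  | nil => exact List.isChain_singleton c
  | cons hh t =>
    simp only [push]
    by_cases hr : react c hh = true
    · rw [if_pos hr]
      exact h.tail
    · rw [if_neg hr]
      exact List.isChain_cons_cons.mpr ⟨by simpa using hr, h⟩

theorem nf_reduced (s : List Char) : Reduced (nf s) := by
  induction s with
  | nil => exact List.isChain_nil
  | cons c t ih => exact push_reduced c ih

theorem nf_of_reduced {s : List Char} (h : Reduced s) : nf s = s := by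
  induction s with
  | nil => rfl
  | cons c t ih =>
    show push c (nf t) = c :: t
    rw [ih h.tail]
    cases t with
    | nil => rfl
    | cons h2 t2 =>
      have : react c h2 = false := (List.isChain_cons_cons.mp h).1
      simp [push, this]

-- the key cancellation: pushing a reacting pair onto a reduced list is the identity
theorem push_cancel {a b : Char} {m : List Char} (hab : react a b = true) (hm : Reduced m) :
    push a (push b m) = m := by
  cases m with
  | nil => simp [push, hab]
  | cons h t =>
    simp only [push]
    by_cases hbh : react b h = true
    · rw [if_pos hbh]
      have hah : a = h := react_unique hab (by rw [react_comm]; exact hbh)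
      subst hah
      cases t with
      | nil => rfl
      | cons h2 t2 =>
        have : react a h2 = false := (List.isChain_cons_cons.mp hm).1
        simp [this]
    · rw [if_neg hbh]
      simp [hab]

theorem nf_middle {a b : Char} (u v : List Char) (hab : react a b = true) :
    nf (u ++ a :: b :: v) = nf (u ++ v) := by
  unfold nf
  rw [List.foldr_append, List.foldr_append]
  show List.foldr push (push a (push b (nf v))) u = _
  rw [push_cancel hab (nf_reduced v)]
  rfl

theorem solveLoop_eq (cs : List Char) : ∀ left, Reduced left → solveLoop left cs = nf (left ++ cs) := by
  induction cs with
  | nil =>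
    intro left hl
    show solveLoop left [] = nf (left ++ [])
    rw [List.append_nil, nf_of_reduced hl]
    rfl
  | cons c rest ih =>
    intro left hl
    show solveLoop left (c :: rest) = nf (left ++ c :: rest)
    by_cases hnil : left = []
    · subst hnil
      show solveLoop [c] rest = nf (c :: rest)
      rw [ih [c] (List.isChain_singleton c)]
      rfl
    · simp only [solveLoop, if_neg hnil]
      rw [PySem.List.pyGetD_neg_one (xs := left) (d := c) hnil]
      by_cases hr : react (left.getLast hnil) c = true
      · rw [if_pos hr, ih left.dropLast (hl.prefix (List.dropLast_prefix left))]
        conv_rhs => rw [← List.dropLast_append_getLast hnil, List.append_assoc]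
        exact (nf_middle _ _ hr).symm
      · rw [if_neg hr]
        have hred : Reduced (left ++ [c]) := by
          refine List.isChain_append.mpr ⟨hl, List.isChain_singleton c, ?_⟩
          intro x hx y hy
          rw [List.getLast?_eq_some_getLast hnil] at hx
          simp at hx hy
          subst hx; subst hy
          simpa using hr
        rw [ih (left ++ [c]) hred, List.append_assoc]
        rfl

theorem reduceOnce_none_reduced : ∀ {s : List Char}, reduceOnce s = none → Reduced s
  | [], _ => List.isChain_nil
  | [c], _ => List.isChain_singleton c
  | a :: b :: rest, h => by
    by_cases hr : react a b = true
    · simp [reduceOnce, hr] at h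
    · simp only [reduceOnce, if_neg hr, Option.map_eq_none_iff] at h
      exact List.isChain_cons_cons.mpr ⟨by simpa using hr, reduceOnce_none_reduced h⟩

theorem reduceOnce_some_spec : ∀ {s t : List Char}, reduceOnce s = some t →
    ∃ u a b v, react a b = true ∧ s = u ++ a :: b :: v ∧ t = u ++ v
  | [], _, h => by simp [reduceOnce] at h
  | [_], _, h => by simp [reduceOnce] at h
  | a :: b :: rest, t, h => by
    by_cases hr : react a b = true
    · simp only [reduceOnce, if_pos hr, Option.some_inj] at h
      exact ⟨[], a, b, rest, hr, rfl, by simp [← h]⟩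
    · simp only [reduceOnce, if_neg hr, Option.map_eq_some_iff] at h
      obtain ⟨t', ht', rfl⟩ := h
      obtain ⟨u, x, y, v, hxy, hs, ht⟩ := reduceOnce_some_spec ht'
      exact ⟨a :: u, x, y, v, hxy, by rw [List.cons_append, ← hs], by rw [List.cons_append, ← ht]⟩

theorem reduceLoop_eq_nf (s : List Char) : reduceLoop s = nf s := by
  rw [reduceLoop]
  split
  · next h => exact (nf_of_reduced (reduceOnce_none_reduced h)).symm
  · next t h =>
    rw [reduceLoop_eq_nf t]
    obtain ⟨u, a, b, v, hab, hs, ht⟩ := reduceOnce_some_spec h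
    rw [hs, ht, nf_middle u v hab]
termination_by s.length
decreasing_by
  rename_i heq
  have := reduceOnce_length heq
  omega

-- ===== VERDICT (by name: the statement is the Claim_ definition above) =====
theorem solve_spec : Claim_equal_solve := by
  intro task _
  show solve task = solve_alt task
  unfold solve solve_alt
  rw [reduceLoop_eq_nf, solveLoop_eq _ [] List.isChain_nil, List.nil_append]
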